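-- pv_equiv track=rewrite | github.com/tigerkdp/DataStructures_and_Algorithms | String/String.py | rewardStudent
-- ===== SOURCE A (Python) =====
-- def rewardStudent(A):
--     n = len(A)
--     absent=0
--     if A.find('LLL') != -1:
--         return False
--
--     for i in range(0, n):
--         if A[i] == "A":
--             absent +=1
--
--     if absent > 1:
--         return False
--
--     return True
-- ===== SOURCE B (Python) =====
-- def rewardStudent(A):
--     run = 0
--     absent = 0
--     for ch in A:
--         if ch == 'L':
--             run += 1
--             if run == 3:
--                 return False
--         else:
--             run = 0
--             if ch == 'A':
--                 absent += 1
--                 if absent > 1: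
--                     return False
--     return True
-- ===== Notes on version B (the rewrite author's own statement) =====
-- stated objective: alternative
-- what changed: Replaces the str.find('LLL') substring scan plus a separate full counting loop with one fused single pass maintaining a run-length counter for consecutive 'L's and an absence counter, with early exit.
import Mathlib
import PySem

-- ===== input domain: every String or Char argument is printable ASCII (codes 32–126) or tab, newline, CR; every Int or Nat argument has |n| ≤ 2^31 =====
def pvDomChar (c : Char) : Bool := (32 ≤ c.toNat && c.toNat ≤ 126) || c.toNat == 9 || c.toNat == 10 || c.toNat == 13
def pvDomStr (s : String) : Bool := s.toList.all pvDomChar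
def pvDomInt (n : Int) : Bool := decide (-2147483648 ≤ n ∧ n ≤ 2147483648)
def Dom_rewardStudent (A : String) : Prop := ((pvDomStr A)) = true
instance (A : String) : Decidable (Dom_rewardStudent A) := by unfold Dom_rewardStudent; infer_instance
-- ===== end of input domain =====

-- B fuses A's find('LLL') scan and separate 'A'-counting loop into one single pass with a run-length counter and early exit.

-- ===== PORT A =====
def rewardStudent (A : String) : Bool :=
  let n : Int := PySem.Str.len A
  if PySem.Str.find A "LLL" != -1 then false
  else
    let absent := (PySem.List.pyRange 0 n 1).foldl
      (fun acc i => if PySem.List.pyGetD A.toList i ' ' == 'A' then acc + 1 else acc) (0 : Int)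
    if absent > 1 then false else true

-- ===== PORT B =====
def rewardStudentLoop : List Char → Nat → Nat → Bool
  | [], _, _ => true
  | c :: cs, run, absent =>
    if c == 'L' then
      if run + 1 == 3 then false else rewardStudentLoop cs (run + 1) absent
    else if c == 'A' then
      if absent + 1 > 1 then false else rewardStudentLoop cs 0 (absent + 1)
    else rewardStudentLoop cs 0 absent

def rewardStudent_alt (A : String) : Bool := rewardStudentLoop A.toList 0 0

-- ===== PRECONDITION & SPEC =====
def Spec_rewardStudent (A : String) (out : Bool) : Prop := out = rewardStudent_alt A
instance (A : String) (out : Bool) : Decidable (Spec_rewardStudent A out) := by unfold Spec_rewardStudent; infer_instance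

-- ===== CLAIM (what is proved, stated in full; the proofs are below) =====
def Claim_equal_rewardStudent : Prop := ∀ (A : String), Dom_rewardStudent A → Spec_rewardStudent A (rewardStudent A)

-- ===== LEMMAS AND PROOFS =====

/-- Pure run-detector: does `cs` contain three consecutive 'L's, given `run` preceding 'L's. -/
def hasLLL : List Char → Nat → Bool
  | [], _ => false
  | c :: cs, run =>
    if c == 'L' then (if run + 1 = 3 then true else hasLLL cs (run + 1))
    else hasLLL cs 0

lemma loop_eq (cs : List Char) : ∀ (run absent : Nat), absent ≤ 1 →
    rewardStudentLoop cs run absent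
      = (!hasLLL cs run && decide (absent + cs.count 'A' ≤ 1)) := by
  induction cs with
  | nil => intro run absent ha; simp [rewardStudentLoop, hasLLL]; omega
  | cons c cs ih =>
    intro run absent ha
    by_cases hL : c = 'L'
    · subst hL
      by_cases h3 : run + 1 = 3
      · simp [rewardStudentLoop, hasLLL, h3]
      · simp [rewardStudentLoop, hasLLL, h3, ih _ _ ha]
        omega
    · by_cases hA : c = 'A'
      · subst hA
        by_cases hb : absent + 1 > 1
        · have hcnt : ¬ (absent + (('A' :: cs).count 'A') ≤ 1) := by
            rw [List.count_cons_self]; omega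
          simp [rewardStudentLoop, hasLLL, hb]
          intro _
          simp at hcnt ⊢
          omega
        · have h0 : absent = 0 := by omega
          subst h0
          simp [rewardStudentLoop, hasLLL, ih 0 1 (by omega)]
      · simp [rewardStudentLoop, hasLLL, hL, hA, ih _ _ ha]

lemma hasLLL_iff (cs : List Char) : ∀ (run : Nat), run ≤ 2 →
    (hasLLL cs run = true ↔
      (List.replicate (3 - run) 'L' <+: cs ∨ ['L','L','L'] <:+: cs)) := by
  induction cs with
  | nil =>
    intro run hr
    have h1 : 3 - run ≠ 0 := by omega
    simp [hasLLL, List.prefix_nil, List.replicate_eq_nil_iff]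
    omega
  | cons c cs ih =>
    intro run hr
    by_cases hL : c = 'L'
    · subst hL
      by_cases h3 : run + 1 = 3
      · have h30 : 3 - run = 1 := by omega
        simp [hasLLL, h3, h30]
      · have hr' : run + 1 ≤ 2 := by omega
        have h30 : 3 - run = (3 - (run + 1)) + 1 := by omega
        rw [show (hasLLL ('L' :: cs) run) = hasLLL cs (run + 1) by simp [hasLLL, h3]]
        rw [ih (run + 1) hr']
        rw [h30, List.replicate_succ, List.cons_prefix_cons]
        rw [List.infix_cons_iff]
        constructor
        · rintro (h | h)
          · exact Or.inl ⟨rfl, h⟩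
          · exact Or.inr (Or.inr h)
        · rintro (⟨-, h⟩ | h | h)
          · exact Or.inl h
          · -- ['L','L','L'] <+: 'L' :: cs gives replicate 2 'L' i.e. ['L','L'] <+: cs,
            -- and replicate (3 - (run+1)) 'L' is a prefix of ['L','L'] since 3-(run+1) ≤ 2
            left
            rw [show (['L','L','L'] : List Char) = 'L' :: ['L','L'] from rfl, List.cons_prefix_cons] at h
            rcases (show 3 - (run + 1) = 1 ∨ 3 - (run + 1) = 2 by omega) with he | he
            · rw [he]
              exact (show List.replicate 1 'L' <+: ['L','L'] by decide).trans h.2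
            · rw [he]
              exact (show List.replicate 2 'L' <+: ['L','L'] by decide).trans h.2
          · exact Or.inr h
    · have hstep : hasLLL (c :: cs) run = hasLLL cs 0 := by simp [hasLLL, hL]
      rw [hstep, ih 0 (by omega)]
      have h1 : 3 - run ≠ 0 := by omega
      constructor
      · rintro (h | h)
        · right
          rw [List.infix_cons_iff]
          right
          exact (show List.replicate 3 'L' = ['L','L','L'] from rfl) ▸ h.isInfix
        · right; exact h.trans (List.suffix_cons c cs).isInfix
      · rintro (h | h)
        · exfalso
          obtain ⟨n, hn⟩ : ∃ n, 3 - run = n + 1 := ⟨3 - run - 1, by omega⟩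
          rw [hn, List.replicate_succ, List.cons_prefix_cons] at h
          exact hL h.1.symm
        · rw [List.infix_cons_iff] at h
          rcases h with h | h
          · exfalso
            rw [show (['L','L','L'] : List Char) = 'L' :: ['L','L'] from rfl, List.cons_prefix_cons] at h
            exact hL h.1.symm
          · exact Or.inr h

lemma hasLLL_zero (cs : List Char) :
    hasLLL cs 0 = decide (['L','L','L'] <:+: cs) := by
  rcases h : decide (['L','L','L'] <:+: cs) with _ | _
  · simp at h
    simp only [Bool.eq_false_iff]
    intro hc
    rcases (hasLLL_iff cs 0 (by omega)).1 hc with hp | hi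
    · exact h ((show List.replicate 3 'L' = ['L','L','L'] from rfl) ▸ hp).isInfix
    · exact h hi
  · simp at h
    exact (hasLLL_iff cs 0 (by omega)).2 (Or.inr h)

lemma countA_foldl (A : String) :
    (PySem.List.pyRange 0 (PySem.Str.len A)).foldl
        (fun acc i => if PySem.List.pyGetD A.toList i ' ' == 'A' then acc + 1 else acc) (0 : Int)
      = (A.toList.count 'A' : Int) := by
  rw [show PySem.Str.len A = ((A.toList.length : Int)) by simp]
  rw [PySem.List.foldl_pyRange_zero_pyGetD' A.toList ' '
        (fun acc x => if x == 'A' then acc + 1 else acc) 0]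
  rw [PySem.List.foldl_beq_add_one]
  simp

lemma alt_eq (A : String) :
    rewardStudent_alt A
      = (!decide (['L','L','L'] <:+: A.toList) && decide (A.toList.count 'A' ≤ 1)) := by
  rw [rewardStudent_alt, loop_eq _ _ _ (by omega), hasLLL_zero]
  simp

-- ===== VERDICT (by name: the statement is the Claim_ definition above) =====
theorem rewardStudent_spec : Claim_equal_rewardStudent := by
  intro A _
  show rewardStudent A = rewardStudent_alt A
  rw [alt_eq, rewardStudent]
  by_cases h : ['L','L','L'] <:+: A.toList
  · have hf : (PySem.Str.find A "LLL" != -1) = true := by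
      rw [bne_iff_ne]
      exact (PySem.Str.find_ne_neg_one_iff A "LLL").2 (by simpa using h)
    rw [hf]
    simp [h]
  · have hf : (PySem.Str.find A "LLL" != -1) = false := by
      simp only [bne_eq_false_iff_eq]
      exact (PySem.Str.find_eq_neg_one_iff A "LLL").2 (by simpa using h)
    simp only [hf, Bool.false_eq_true, if_false, countA_foldl]
    simp only [h, decide_false, Bool.not_false, Bool.true_and]
    by_cases hc : (A.toList.count 'A' : Int) > 1
    · rw [if_pos hc]
      have : ¬ (A.toList.count 'A' ≤ 1) := by exact_mod_cast (by omega : ¬ ((A.toList.count 'A' : Int) ≤ 1))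
      simp [this]
    · rw [if_neg hc]
      have : A.toList.count 'A' ≤ 1 := by exact_mod_cast (by omega : ((A.toList.count 'A' : Int) ≤ 1))
      simp [this]
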